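-- pv_equiv track=rewrite | github.com/MilaimKas/BuildClassifer | src/BuildClassifier/tuning/tuning_helpers.py | generate_architectures
-- ===== SOURCE A (Python) =====
-- from itertools import product
--
-- def generate_architectures(min_layers, max_layers, min_neurons, max_neurons, step=32):
--     """
--     Create a list of all possible NN architecture that satisfies the following criteria:
--     - minimum number of layers
--     - maximum number of layers
--     - minimum number of neurons per layers
--     - maximum number of neurons per layers
--     - number of neurons step of 32
--     - Returns decreasing deep layer size
--     """
--     candidates = []
--     possible_sizes = list(range(min_neurons, max_neurons + 1, step))
--
--     for depth in range(min_layers, max_layers + 1):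
--         for combo in product(possible_sizes, repeat=depth):
--             if all(combo[i] >= combo[i+1] for i in range(len(combo)-1)):  # decreasing or flat
--                 candidates.append("_".join(map(str, combo)))
--     return candidates
-- ===== SOURCE B (Python) =====
-- def generate_architectures(min_layers, max_layers, min_neurons, max_neurons, step=32):
--     """Same architectures as A, but generated directly and iteratively: the
--     non-increasing sequences are grown level by level (each next layer drawn
--     only from the sizes <= the previous one), the level is shared across
--     depths, and the full Cartesian product is never enumerated; same
--     lexicographic order as A's filtered product."""
--     sizes = list(range(min_neurons, max_neurons + 1, step))
--     if max_layers < min_layers: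
--         return []
--
--     def grow(level):
--         return [seq + [v]
--                 for seq in level
--                 for v in (sizes if not seq else [s for s in sizes if s <= seq[-1]])]
--
--     level = [[]]
--     for _ in range(min_layers):
--         if not level:
--             break
--         level = grow(level)
--     out = []
--     for depth in range(min_layers, max_layers + 1):
--         out.extend("_".join(map(str, seq)) for seq in level)
--         if level:
--             level = grow(level)
--     return out
-- ===== Notes on version B (the rewrite author's own statement) =====
-- stated objective: alternative
-- what changed: Instead of enumerating the full Cartesian product of layer sizes for each depth and filtering out the increasing sequences, B grows only the non-increasing sequences iteratively level by level (each next layer drawn from the sizes <= the previous one), in the same lexicographic order.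
import Mathlib
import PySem

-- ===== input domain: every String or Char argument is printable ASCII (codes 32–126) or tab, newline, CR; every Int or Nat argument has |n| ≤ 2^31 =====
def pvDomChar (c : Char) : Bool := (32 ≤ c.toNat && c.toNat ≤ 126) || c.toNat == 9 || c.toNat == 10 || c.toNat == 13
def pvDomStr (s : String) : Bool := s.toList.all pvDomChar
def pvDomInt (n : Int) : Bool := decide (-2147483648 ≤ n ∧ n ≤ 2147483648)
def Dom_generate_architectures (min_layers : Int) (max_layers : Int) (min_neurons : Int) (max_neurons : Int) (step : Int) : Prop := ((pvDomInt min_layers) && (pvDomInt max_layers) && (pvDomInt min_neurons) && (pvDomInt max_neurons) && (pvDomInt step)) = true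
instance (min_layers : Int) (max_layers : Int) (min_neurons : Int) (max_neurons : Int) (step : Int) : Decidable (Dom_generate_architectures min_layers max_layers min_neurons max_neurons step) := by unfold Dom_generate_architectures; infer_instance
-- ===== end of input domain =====

-- B replaces A's filter-over-full-Cartesian-product with direct iterative level-by-level
-- generation of only the non-increasing sequences, in the same lexicographic order
-- (objective: alternative algorithm that never builds the rejected sequences).

-- ===== PORT A =====

-- itertools.product(xs, repeat=n): all length-n tuples in lexicographic order
def pvProduct (xs : List Int) : Nat → List (List Int)
  | 0 => [[]]
  | n + 1 => xs.flatMap (fun v => (pvProduct xs n).map (v :: ·))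

-- all(combo[i] >= combo[i+1] for i in range(len(combo)-1))
def pvNonInc : List Int → Bool
  | a :: b :: t => a ≥ b && pvNonInc (b :: t)
  | _ => true

-- "_".join(map(str, combo))
def pvJoin (combo : List Int) : String :=
  PySem.Str.join "_" (combo.map PySem.Int.toStr)

def generate_architectures (min_layers : Int) (max_layers : Int) (min_neurons : Int) (max_neurons : Int) (step : Int) : List String :=
  let possible_sizes := PySem.List.pyRange min_neurons (max_neurons + 1) step
  (PySem.List.pyRange min_layers (max_layers + 1) 1).foldl
    (fun candidates depth =>
      (pvProduct possible_sizes depth.toNat).foldl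
        (fun candidates combo =>
          if pvNonInc combo then candidates ++ [pvJoin combo] else candidates)
        candidates)
    []

-- ===== PORT B =====

-- one level of growth: extend a sequence by every admissible next size
-- (all sizes if the sequence is empty, else the sizes <= its last element)
def pvExtend (sizes : List Int) (seq : List Int) : List (List Int) :=
  (match seq.getLast? with
   | none => sizes
   | some last => sizes.filter (fun s => decide (s ≤ last))).map (fun v => seq ++ [v])

-- the first 'for _ in range(min_layers): if not level: break; level = grow(level)' loop
def pvLevels (sizes : List Int) : Nat → List (List Int) → List (List Int)
  | 0, level => level
  | n + 1, level =>
    if level = [] then level else pvLevels sizes n (level.flatMap (pvExtend sizes))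

def generate_architectures_alt (min_layers : Int) (max_layers : Int) (min_neurons : Int) (max_neurons : Int) (step : Int) : List String :=
  let sizes := PySem.List.pyRange min_neurons (max_neurons + 1) step
  if max_layers < min_layers then [] else
  let level := pvLevels sizes min_layers.toNat [[]]
  ((PySem.List.pyRange min_layers (max_layers + 1) 1).foldl
    (fun st _ =>
      (st.1 ++ st.2.map pvJoin,
       if st.2 = [] then st.2 else st.2.flatMap (pvExtend sizes)))
    (([] : List String), level)).1

-- ===== PRECONDITION & SPEC =====
-- Pre_ excludes exactly the inputs where Python A raises ValueError: step == 0
-- (range with zero step) and a negative depth reached by the loop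
-- (product(…, repeat=d) with d < 0, i.e. min_layers < 0 and min_layers ≤ max_layers).
def Pre_generate_architectures (min_layers : Int) (max_layers : Int) (min_neurons : Int) (max_neurons : Int) (step : Int) : Prop :=
  step ≠ 0 ∧ (0 ≤ min_layers ∨ max_layers < min_layers)
instance (min_layers : Int) (max_layers : Int) (min_neurons : Int) (max_neurons : Int) (step : Int) : Decidable (Pre_generate_architectures min_layers max_layers min_neurons max_neurons step) := by unfold Pre_generate_architectures; infer_instance

def pvWitness_generate_architectures : Int × Int × Int × Int × Int := (1, 3, 8, 64, 32)

def Spec_generate_architectures (min_layers : Int) (max_layers : Int) (min_neurons : Int) (max_neurons : Int) (step : Int) (out : List String) : Prop := out = generate_architectures_alt min_layers max_layers min_neurons max_neurons step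
instance (min_layers : Int) (max_layers : Int) (min_neurons : Int) (max_neurons : Int) (step : Int) (out : List String) : Decidable (Spec_generate_architectures min_layers max_layers min_neurons max_neurons step out) := by unfold Spec_generate_architectures; infer_instance

-- ===== CLAIM (what is proved, stated in full; the proofs are below) =====
def Claim_equal_generate_architectures : Prop := ∀ (min_layers : Int) (max_layers : Int) (min_neurons : Int) (max_neurons : Int) (step : Int), Dom_generate_architectures min_layers max_layers min_neurons max_neurons step → Pre_generate_architectures min_layers max_layers min_neurons max_neurons step → Spec_generate_architectures min_layers max_layers min_neurons max_neurons step (generate_architectures min_layers max_layers min_neurons max_neurons step)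

-- ===== LEMMAS AND PROOFS =====

-- the non-increasing sequences, in A's order (proof-side abbreviation)
def pvNI (xs : List Int) (k : Nat) : List (List Int) := (pvProduct xs k).filter pvNonInc

-- a non-increasing list headed by b has every tail element ≤ b
theorem pvNonInc_all_le (b : Int) (t : List Int) (h : pvNonInc (b :: t) = true) :
    ∀ s ∈ t, s ≤ b := by
  induction t generalizing b with
  | nil => intro s hs; cases hs
  | cons c t ih =>
    simp only [pvNonInc, Bool.and_eq_true, ge_iff_le, decide_eq_true_eq] at h
    intro s hs
    rcases List.mem_cons.mp hs with rfl | hs'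
    · exact h.1
    · exact le_trans (ih c h.2 s hs') h.1

theorem pvNonInc_cons (v : Int) (t : List Int) :
    pvNonInc (v :: t) = (t.all (fun s => decide (s ≤ v)) && pvNonInc t) := by
  cases t with
  | nil => rfl
  | cons b t =>
    simp only [pvNonInc, List.all_cons]
    by_cases hh : pvNonInc (b :: t) = true
    · have hall := pvNonInc_all_le b t hh
      by_cases hb : b ≤ v
      · have h2 : t.all (fun s => decide (s ≤ v)) = true := by
          simp only [List.all_eq_true, decide_eq_true_eq]
          exact fun s hs => le_trans (hall s hs) hb
        simp [hh, hb, h2]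
      · simp [hh, hb]
    · simp only [Bool.not_eq_true] at hh
      simp [hh]

-- flatMap over a filtered list = flatMap producing [] on the rejected elements
theorem pvFlatMap_filter {α β : Type} (p : α → Bool) (g : α → List β) (xs : List α) :
    (xs.filter p).flatMap g = xs.flatMap (fun v => if p v then g v else []) := by
  induction xs with
  | nil => rfl
  | cons a xs ih => by_cases h : p a = true <;> simp [h, ih]

theorem pvFlatMap_congr_mem {α β : Type} (f g : α → List β) (l : List α)
    (h : ∀ a ∈ l, f a = g a) : l.flatMap f = l.flatMap g := by
  induction l with
  | nil => rfl
  | cons a l ih =>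
    simp only [List.flatMap_cons, h a (List.mem_cons_self),
      ih (fun a ha => h a (List.mem_cons_of_mem _ ha))]

-- restricting the alphabet = filtering the product for 'all elements admitted'
theorem pvProduct_filter (p : Int → Bool) (xs : List Int) (n : Nat) :
    pvProduct (xs.filter p) n = (pvProduct xs n).filter (fun t => t.all p) := by
  induction n with
  | zero => simp [pvProduct]
  | succ n ih =>
    simp only [pvProduct, ih, pvFlatMap_filter]
    rw [List.filter_flatMap]
    congr 1
    funext v
    rw [List.filter_map]
    by_cases h : p v = true
    · simp only [h, if_pos]
      congr 1
      apply List.filter_congr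
      intro t _
      simp [Function.comp, h]
    · rw [if_neg h]
      symm
      rw [List.map_eq_nil_iff, List.filter_eq_nil_iff]
      intro t ht
      simp only [Function.comp_apply, List.all_cons, Bool.and_eq_true]
      exact fun hc => absurd hc.1 h

-- peeling the first position off the filtered product
theorem pvNI_succ (xs : List Int) (n : Nat) :
    pvNI xs (n + 1)
      = xs.flatMap (fun v => (pvNI (xs.filter (fun s => decide (s ≤ v))) n).map (v :: ·)) := by
  unfold pvNI
  conv_lhs => rw [pvProduct]
  rw [List.filter_flatMap]
  congr 1
  funext v
  rw [pvProduct_filter, List.filter_filter, List.filter_map]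
  congr 1
  apply List.filter_congr
  intro t _
  simp [Function.comp, pvNonInc_cons, Bool.and_comm]

theorem pvMem_product (xs : List Int) (n : Nat) (t : List Int) (ht : t ∈ pvProduct xs n) :
    ∀ x ∈ t, x ∈ xs := by
  induction n generalizing t with
  | zero =>
    simp only [pvProduct, List.mem_singleton] at ht
    subst ht; intro x hx; cases hx
  | succ n ih =>
    simp only [pvProduct, List.mem_flatMap, List.mem_map] at ht
    obtain ⟨v, hv, u, hu, rfl⟩ := ht
    intro x hx
    rcases List.mem_cons.mp hx with rfl | hx'
    · exact hv
    · exact ih u hu x hx'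

-- extending behind a fixed head v commutes with prefixing v,
-- provided every element of u is ≤ v
theorem pvExtend_comm (xs : List Int) (v : Int) (u : List Int)
    (hu : ∀ x ∈ u, x ≤ v) :
    (pvExtend (xs.filter (fun s => decide (s ≤ v))) u).map (v :: ·)
      = pvExtend xs (v :: u) := by
  cases hu' : u.getLast? with
  | none =>
    rw [List.getLast?_eq_none_iff] at hu'
    subst hu'
    simp [pvExtend]
  | some l =>
    have hne : u ≠ [] := by
      intro h; subst h; simp at hu'
    have hl : l ≤ v := by
      have hm : l ∈ u := by
        have hg := List.getLast?_eq_some_getLast hne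
        rw [hg, Option.some_inj] at hu'
        exact hu' ▸ List.getLast_mem hne
      exact hu l hm
    have hlast : (v :: u).getLast? = some l := by
      have hg := List.getLast?_eq_some_getLast hne
      rw [hg, Option.some_inj] at hu'
      cases u with
      | nil => exact absurd rfl hne
      | cons b u' =>
        rw [List.getLast?_cons_cons, List.getLast?_eq_some_getLast hne, Option.some_inj]
        exact hu'
    simp only [pvExtend, hu', hlast]
    rw [List.filter_filter]
    rw [List.filter_congr (fun s _ => ?_), List.map_map]
    · rfl
    · by_cases hs : s ≤ l
      · simp [hs, le_trans hs hl]
      · simp [hs]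

-- one BFS level applied to the non-increasing k-sequences gives the (k+1)-sequences
theorem pvStep_NI (xs : List Int) (k : Nat) :
    (pvNI xs k).flatMap (pvExtend xs) = pvNI xs (k + 1) := by
  induction k generalizing xs with
  | zero =>
    show [([] : List Int)].flatMap (pvExtend xs) = pvNI xs 1
    rw [pvNI_succ]
    simp [pvExtend, pvNonInc, pvNI, pvProduct, List.flatMap]
    induction xs with
    | nil => rfl
    | cons a xs ih => simp [ih]
  | succ k ih =>
    rw [pvNI_succ, pvNI_succ]
    rw [List.flatMap_assoc]
    congr 1
    funext v
    rw [List.flatMap_map, ← ih, List.map_flatMap]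
    apply pvFlatMap_congr_mem
    intro u hu
    simp only [pvNI, List.mem_filter] at hu
    refine (pvExtend_comm xs v u fun x hx => ?_).symm
    have := pvMem_product _ _ u hu.1 x hx
    simpa using List.of_mem_filter this

theorem pvNI_zero (xs : List Int) : pvNI xs 0 = [[]] := rfl

theorem pvNI_nil_succ (xs : List Int) (k : Nat) (h : pvNI xs k = []) :
    pvNI xs (k + 1) = [] := by
  rw [← pvStep_NI, h]; rfl

theorem pvNI_nil_add (xs : List Int) (k m : Nat) (h : pvNI xs k = []) :
    pvNI xs (k + m) = [] := by
  induction m with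
  | zero => exact h
  | succ m ihm => exact pvNI_nil_succ xs _ ihm

-- running n BFS levels from the k-sequences lands on the (k+n)-sequences
theorem pvLevels_NI (xs : List Int) (n k : Nat) :
    pvLevels xs n (pvNI xs k) = pvNI xs (k + n) := by
  induction n generalizing k with
  | zero => rfl
  | succ n ih =>
    show (if pvNI xs k = [] then pvNI xs k else pvLevels xs n ((pvNI xs k).flatMap (pvExtend xs)))
      = pvNI xs (k + (n + 1))
    by_cases h : pvNI xs k = []
    · rw [if_pos h, h]
      exact (pvNI_nil_add xs k (n + 1) h).symm
    · rw [if_neg h, pvStep_NI, ih (k + 1)]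
      congr 1
      omega

-- A's foldl-with-conditional-append accumulation = append of the filtered, mapped list
theorem pvFold_filter_join (l : List (List Int)) (acc : List String) :
    l.foldl (fun cand combo => if pvNonInc combo then cand ++ [pvJoin combo] else cand) acc
      = acc ++ (l.filter pvNonInc).map pvJoin := by
  induction l generalizing acc with
  | nil => simp
  | cons c l ih =>
    simp only [List.foldl_cons, List.filter_cons]
    by_cases h : pvNonInc c = true
    · simp [h, ih]
    · simp only [Bool.not_eq_true] at h
      simp [h, ih]

-- ===== VERDICT (by name: the statement is the Claim_ definition above) =====
theorem pvFoldl_append (f : Int → List String) (ds : List Int) (acc : List String) :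
    ds.foldl (fun c d => c ++ f d) acc = acc ++ ds.flatMap f := by
  induction ds generalizing acc with
  | nil => simp
  | cons d ds ih => simp [ih]

theorem pvStep_guard (sizes : List Int) (level : List (List Int)) :
    (if level = [] then level else level.flatMap (pvExtend sizes))
      = level.flatMap (pvExtend sizes) := by
  split_ifs with h
  · rw [h]; rfl
  · rfl

-- the emit-then-grow loop, started on the non-increasing a-sequences,
-- produces exactly A's per-depth filtered lists for depths a, …, b-1
theorem pvEmitLoop (sizes : List Int) (n : Nat) :
    ∀ (a b : Int), 0 ≤ a → (b - a).toNat = n → ∀ (acc : List String),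
    ((PySem.List.pyRange a b 1).foldl
      (fun st _ =>
        (st.1 ++ st.2.map pvJoin,
         if st.2 = [] then st.2 else st.2.flatMap (pvExtend sizes)))
      (acc, pvNI sizes a.toNat)).1
      = acc ++ (PySem.List.pyRange a b 1).flatMap
          (fun d => (pvNI sizes d.toNat).map pvJoin) := by
  induction n with
  | zero =>
    intro a b _ h0 acc
    rw [PySem.List.pyRange_one_eq_nil (by omega)]
    simp
  | succ n ih =>
    intro a b ha h1 acc
    rw [PySem.List.pyRange_one_cons (by omega)]
    simp only [List.foldl_cons, List.flatMap_cons]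
    have hstep : (pvNI sizes a.toNat).flatMap (pvExtend sizes) = pvNI sizes (a + 1).toNat := by
      rw [pvStep_NI]
      congr 1
      omega
    rw [pvStep_guard, hstep, ih (a + 1) b (by omega) (by omega) (acc ++ (pvNI sizes a.toNat).map pvJoin)]
    simp

theorem generate_architectures_spec : Claim_equal_generate_architectures := by
  intro ml Ml mn Mn st _ hpre
  unfold Spec_generate_architectures
  have hf : (fun (cand : List String) (depth : Int) =>
      (pvProduct (PySem.List.pyRange mn (Mn + 1) st) depth.toNat).foldl
        (fun cand combo => if pvNonInc combo then cand ++ [pvJoin combo] else cand) cand)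
      = fun cand depth =>
        cand ++ (pvNI (PySem.List.pyRange mn (Mn + 1) st) depth.toNat).map pvJoin := by
    funext cand depth
    rw [pvFold_filter_join]
    rfl
  have hA : generate_architectures ml Ml mn Mn st
      = (PySem.List.pyRange ml (Ml + 1) 1).flatMap
          (fun d => (pvNI (PySem.List.pyRange mn (Mn + 1) st) d.toNat).map pvJoin) := by
    unfold generate_architectures
    simp only [hf]
    rw [pvFoldl_append]
    simp
  have hB : generate_architectures_alt ml Ml mn Mn st
      = (PySem.List.pyRange ml (Ml + 1) 1).flatMap
          (fun d => (pvNI (PySem.List.pyRange mn (Mn + 1) st) d.toNat).map pvJoin) := by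
    rcases hpre with ⟨_, hml | hml⟩
    · by_cases hc : Ml < ml
      · unfold generate_architectures_alt
        simp only [hc, if_true]
        rw [PySem.List.pyRange_one_eq_nil (by omega)]
        rfl
      · have hlev : pvLevels (PySem.List.pyRange mn (Mn + 1) st) ml.toNat [[]]
            = pvNI (PySem.List.pyRange mn (Mn + 1) st) ml.toNat := by
          have h0 := pvLevels_NI (PySem.List.pyRange mn (Mn + 1) st) ml.toNat 0
          rw [pvNI_zero] at h0
          simpa using h0
        unfold generate_architectures_alt
        simp only [hc, if_false, hlev]
        rw [pvEmitLoop (PySem.List.pyRange mn (Mn + 1) st) ((Ml + 1) - ml).toNat ml (Ml + 1)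
          hml rfl []]
        simp
    · unfold generate_architectures_alt
      simp only [hml, if_true]
      rw [PySem.List.pyRange_one_eq_nil (by omega)]
      rfl
  rw [hA, hB]
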